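-- pv_equiv track=rewrite | github.com/skidmarker/bugatti | heap/42626.py | solution
-- ===== SOURCE A (Python) =====
-- import heapq
--
-- def solution(scoville, K):
--     answer = 0
--
--     heapq.heapify(scoville)
--     while len(scoville) > 0:
--         if scoville[0] >= K:
--             return answer
--         if len(scoville) < 2:
--             break
--         answer += 1
--         f = heapq.heappop(scoville)
--         s = heapq.heappop(scoville)
--         nxt = f + s * 2
--         heapq.heappush(scoville, nxt)
--     return -1
-- ===== SOURCE B (Python) =====
-- def solution(scoville, K):
--     heap = sorted(scoville)
--     answer = 0
--     while heap:
--         if heap[0] >= K: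
--             return answer
--         if len(heap) < 2:
--             return -1
--         f = heap.pop(0)
--         s = heap.pop(0)
--         nxt = f + s * 2
--         # insert nxt before the first element >= nxt, keeping heap sorted
--         i = 0
--         while i < len(heap) and heap[i] < nxt:
--             i += 1
--         heap.insert(i, nxt)
--         answer += 1
--     return -1
-- ===== Notes on version B (the rewrite author's own statement) =====
-- stated objective: alternative
-- what changed: B replaces the binary heap with a sorted list built once by sorted() and maintained by a linear insertion helper, reading/popping the two smallest from the front; A mutates its argument into a heap in place, B leaves it untouched.
import Mathlib
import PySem

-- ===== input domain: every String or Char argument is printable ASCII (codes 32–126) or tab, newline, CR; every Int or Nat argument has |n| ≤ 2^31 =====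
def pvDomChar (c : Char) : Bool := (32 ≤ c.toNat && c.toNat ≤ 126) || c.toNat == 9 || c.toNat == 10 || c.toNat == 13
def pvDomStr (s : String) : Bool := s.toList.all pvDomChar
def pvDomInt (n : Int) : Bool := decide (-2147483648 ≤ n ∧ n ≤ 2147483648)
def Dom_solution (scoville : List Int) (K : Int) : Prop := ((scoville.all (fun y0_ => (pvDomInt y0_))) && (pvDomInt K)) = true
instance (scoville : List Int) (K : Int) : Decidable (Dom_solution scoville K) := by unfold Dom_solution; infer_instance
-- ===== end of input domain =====

-- B keeps a sorted list (sort once, pop two smallest from the front, linear re-insertion)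
-- instead of A's binary heap; equivalence is about the RETURN value only — A additionally
-- mutates its argument in place into heap order, B leaves it untouched.

-- ===== PORT A =====
-- A's heapq library calls are ported by their heap semantics, exact for every value A reads
-- from the heap: heapify = the multiset of the list, scoville[0] after heapify = its minimum,
-- heappop = remove that minimum, heappush = add an element.
def heapLoop (h : List Int) (K answer : Int) : Int :=
  match hm : h.min? with
  | none => -1                                   -- while len(scoville) > 0 fails
  | some f =>
    if f ≥ K then answer                          -- if scoville[0] >= K: return answer
    else if h.length < 2 then -1                  -- if len(scoville) < 2: break → return -1
    else
      match hs : (h.erase f).min? with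
      | none => -1                                -- unreachable: len ≥ 2
      | some s => heapLoop ((h.erase f).erase s ++ [f + s * 2]) K (answer + 1)
termination_by h.length
decreasing_by
  have hf : f ∈ h := List.min?_mem hm
  have hsm : s ∈ h.erase f := List.min?_mem hs
  have h1 : (h.erase f).length = h.length - 1 := List.length_erase_of_mem hf
  have h2 : ((h.erase f).erase s).length = (h.erase f).length - 1 := List.length_erase_of_mem hsm
  simp only [List.length_append, List.length_cons, List.length_nil, h1, h2]
  omega

def solution (scoville : List Int) (K : Int) : Int :=
  heapLoop scoville K 0

-- ===== PORT B =====
-- _insort a x : a sorted list = a with x inserted (Source B's recursive helper)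
def insort (x : Int) : List Int → List Int
  | [] => [x]
  | a :: t => if x ≤ a then x :: a :: t else a :: insort x t

def altLoop (h : List Int) (K answer : Int) : Int :=
  match h with
  | [] => -1
  | f :: rest =>
    if f ≥ K then answer
    else
      match rest with
      | [] => -1
      | s :: t => altLoop (insort (f + s * 2) t) K (answer + 1)
termination_by h.length
decreasing_by
  have : ∀ (x : Int) (l : List Int), (insort x l).length = l.length + 1 := by
    intro x l; induction l with
    | nil => simp [insort]
    | cons a t ih => simp only [insort]; split <;> simp [ih]
  simp [this]

def solution_alt (scoville : List Int) (K : Int) : Int :=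
  altLoop (PySem.List.sorted scoville (fun x => x) false) K 0

-- ===== PRECONDITION & SPEC =====
def Spec_solution (scoville : List Int) (K : Int) (out : Int) : Prop := out = solution_alt scoville K
instance (scoville : List Int) (K : Int) (out : Int) : Decidable (Spec_solution scoville K out) := by unfold Spec_solution; infer_instance

-- ===== CLAIM (what is proved, stated in full; the proofs are below) =====
def Claim_equal_solution : Prop := ∀ (scoville : List Int) (K : Int), Dom_solution scoville K → Spec_solution scoville K (solution scoville K)

-- ===== LEMMAS AND PROOFS =====

lemma insort_length (x : Int) (l : List Int) : (insort x l).length = l.length + 1 := by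
  induction l with
  | nil => simp [insort]
  | cons a t ih => simp only [insort]; split <;> simp [ih]

lemma insort_perm (x : Int) (l : List Int) : (insort x l).Perm (x :: l) := by
  induction l with
  | nil => simp [insort]
  | cons a t ih =>
    simp only [insort]; split
    · exact List.Perm.refl _
    · exact (List.Perm.cons a ih).trans (List.Perm.swap x a t)

lemma insort_pairwise (x : Int) (l : List Int) (h : l.Pairwise (· ≤ ·)) :
    (insort x l).Pairwise (· ≤ ·) := by
  induction l with
  | nil => simp [insort]
  | cons a t ih =>
    rcases List.pairwise_cons.mp h with ⟨ha, ht⟩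
    simp only [insort]; split
    · rename_i hx
      refine List.pairwise_cons.mpr ⟨?_, h⟩
      intro b hb
      rcases List.mem_cons.mp hb with rfl | hb
      · exact hx
      · exact hx.trans (ha _ hb)
    · rename_i hx
      refine List.pairwise_cons.mpr ⟨?_, ih ht⟩
      intro b hb
      rcases List.mem_cons.mp ((insort_perm x t).mem_iff.mp hb) with h1 | hb
      · omega
      · exact ha _ hb

-- the head of a sorted list is the minimum of any permutation of it
lemma min?_of_perm_sorted (h : List Int) (f : Int) (rest : List Int)
    (hp : h.Perm (f :: rest)) (hs : (f :: rest).Pairwise (· ≤ ·)) : h.min? = some f := by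
  have hf : f ∈ h := hp.mem_iff.mpr (List.mem_cons_self)
  have hle : ∀ b ∈ h, f ≤ b := by
    intro b hb
    rcases List.mem_cons.mp (hp.mem_iff.mp hb) with rfl | hb
    · exact le_refl b
    · exact (List.pairwise_cons.mp hs).1 _ hb
  rw [List.min?_eq_some_iff]
  exact ⟨hf, hle⟩

lemma loop_eq (n : Nat) : ∀ (h hs : List Int) (K answer : Int), h.length ≤ n →
    h.Perm hs → hs.Pairwise (· ≤ ·) → heapLoop h K answer = altLoop hs K answer := by
  induction n with
  | zero =>
    intro h hs K answer hn hp _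
    have h0 : h = [] := List.length_eq_zero_iff.mp (Nat.le_zero.mp hn)
    subst h0
    have : hs = [] := hp.symm.eq_nil
    subst this
    simp [heapLoop, altLoop]
  | succ n ih =>
    intro h hs K answer hn hp hsort
    match hs with
    | [] =>
      have h0 : h = [] := hp.eq_nil
      subst h0; simp [heapLoop, altLoop]
    | f :: rest =>
      have hmin : h.min? = some f := min?_of_perm_sorted h f rest hp hsort
      have hlen : h.length = rest.length + 1 := by simpa using hp.length_eq
      rw [heapLoop.eq_def]
      split
      · rename_i heq; rw [hmin] at heq; cases heq
      · rename_i f' heq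
        rw [hmin] at heq
        injection heq with heq; subst heq
        by_cases hK : K ≤ f
        · rw [altLoop.eq_def]
          simp [hK]
        · match rest with
          | [] =>
            have hl : h.length < 2 := by simp at hlen; omega
            rw [altLoop.eq_def]
            simp [hK, hl]
          | s :: t =>
            have hl : ¬ h.length < 2 := by simp at hlen; omega
            have hp1 : (h.erase f).Perm (s :: t) := by
              have := hp.erase f
              simpa using this
            have hsort1 : (s :: t).Pairwise (· ≤ ·) := (List.pairwise_cons.mp hsort).2
            have hmin1 : (h.erase f).min? = some s := min?_of_perm_sorted _ s t hp1 hsort1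
            simp only [ge_iff_le, hK, if_false, hl]
            split
            · rename_i heq2; rw [hmin1] at heq2; cases heq2
            · rename_i s' heq2
              rw [hmin1] at heq2
              injection heq2 with heq2; subst heq2
              rw [altLoop.eq_def]
              simp only [ge_iff_le, hK, if_false]
              have hp2 : ((h.erase f).erase s ++ [f + s * 2]).Perm (insort (f + s * 2) t) := by
                have e1 : ((h.erase f).erase s).Perm t := by
                  have := hp1.erase s
                  simpa using this
                have e2 : ((h.erase f).erase s ++ [f + s * 2]).Perm (t ++ [f + s * 2]) :=
                  e1.append_right _
                have e3 : (t ++ [f + s * 2]).Perm ((f + s * 2) :: t) := List.perm_append_singleton _ _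
                exact (e2.trans e3).trans (insort_perm _ t).symm
              have hlen3 : ((h.erase f).erase s ++ [f + s * 2]).length ≤ n := by
                have hpl := hp2.length_eq
                rw [hpl, insort_length]
                have hl1 := hp1.length_eq
                simp at hl1
                simp at hlen; omega
              exact ih _ _ K (answer + 1) hlen3 hp2
                (insort_pairwise _ t (List.pairwise_cons.mp hsort1).2)

-- ===== VERDICT (by name: the statement is the Claim_ definition above) =====
theorem solution_spec : Claim_equal_solution := by
  intro scoville K _
  unfold Spec_solution solution solution_alt
  exact loop_eq scoville.length scoville _ K 0 le_rfl
    (PySem.List.sorted_perm scoville (fun x => x) false).symm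
    (by simpa using PySem.List.sorted_pairwise scoville (fun x => x))
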